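-- pv_equiv track=rewrite | github.com/AntoCat93/HW3_G24 | utils.py | get_blocks
-- ===== SOURCE A (Python) =====
-- def get_blocks(line, ids):
--     """ The function takes the second line of tsv file( with ' \t ' as seperator) as argument
--     along with ids (title - 0, into - 1, plot - 3 and so on...).
--     It returns the list of values of title, into etc. It is written in order to speed up 'data_from_tsv' function
--     which, in turn, speed up index creation and the search output.
--     """
--     pos_from = 0
--     counter = -1
--     i = 0
--     res = []
--     while True:
--         pos_to = line.find(' \t ', pos_from)
--         counter += 1
--
--         if pos_to == -1:
--             break
--
--         if not ids or counter == ids[i]: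
--             res.append(line[pos_from: pos_to])
--             i += 1
--         pos_from = pos_to + 3
--
--         if i == len(ids):
--             break
--
--     if not ids or (i < len(ids) and counter == ids[i]):
--         res.append(line[pos_from: ])
--
--     return res
-- ===== SOURCE B (Python) =====
-- def get_blocks(line, ids):
--     """Split once, then greedily pick the fields named by the monotone prefix of ids."""
--     fields = line.split(' \t ')
--     if not ids:
--         return fields
--     res = []
--     prev = -1
--     for t in ids:
--         if prev < t < len(fields):
--             res.append(fields[t])
--             prev = t
--         else:
--             break
--     return res
-- ===== Notes on version B (the rewrite author's own statement) =====
-- stated objective: simpler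
-- what changed: B splits the line once with str.split(' \t ') and then greedily walks ids keeping only the last matched index (prev < t < len(fields)), instead of A's find/slice scanning loop that counts every field and compares the counter against a pointer into ids.
import Mathlib
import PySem

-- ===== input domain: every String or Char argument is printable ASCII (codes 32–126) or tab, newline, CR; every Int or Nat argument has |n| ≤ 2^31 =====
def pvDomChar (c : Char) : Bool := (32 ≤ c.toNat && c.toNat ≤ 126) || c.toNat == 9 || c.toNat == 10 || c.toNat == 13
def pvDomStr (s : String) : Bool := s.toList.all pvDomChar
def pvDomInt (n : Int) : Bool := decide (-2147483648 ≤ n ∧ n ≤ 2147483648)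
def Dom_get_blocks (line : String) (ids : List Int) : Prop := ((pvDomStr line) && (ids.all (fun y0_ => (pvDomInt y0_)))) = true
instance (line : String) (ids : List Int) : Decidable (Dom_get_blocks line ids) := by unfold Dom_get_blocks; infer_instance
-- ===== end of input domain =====

-- B: split the line once and greedily walk ids (prev < t < len(fields)) instead of A's
-- find/slice scanning loop; simpler, same exact return value (A is total; no mutation).


-- ===== PORT A =====
-- the while-True loop; fuel (line length + 1) only makes the recursion total, every run
-- terminates before it runs out. State: (pos_from, counter, i, res); returns the final state.
-- `ids[i]` is `ids.getD i 0`: whenever Python evaluates it, i < len(ids) (i only grows on a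
-- match and the loop breaks at i = len(ids)), so the default is never taken.
def getBlocksLoop (line : String) (ids : List Int) :
    Nat → Int → Int → Nat → List String → (List String × Int × Int × Nat)
  | 0, pos_from, counter, i, res => (res, pos_from, counter, i)
  | fuel + 1, pos_from, counter, i, res =>
    let pos_to := PySem.Str.findFrom line " \t " pos_from
    let counter' := counter + 1
    if pos_to = -1 then (res, pos_from, counter', i)
    else
      let st : List String × Nat :=
        if ids = [] ∨ counter' = ids.getD i 0
        then (res ++ [PySem.Str.slice line (some pos_from) (some pos_to)], i + 1)
        else (res, i)
      let pos_from' := pos_to + 3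
      if st.2 = ids.length then (st.1, pos_from', counter', st.2)
      else getBlocksLoop line ids fuel pos_from' counter' st.2 st.1

def get_blocks (line : String) (ids : List Int) : List String :=
  let st := getBlocksLoop line ids (line.toList.length + 1) 0 (-1) 0 []
  if ids = [] ∨ (st.2.2.2 < ids.length ∧ st.2.2.1 = ids.getD st.2.2.2 0)
  then st.1 ++ [PySem.Str.slice line (some st.2.1) none]
  else st.1

-- ===== PORT B =====
-- the for-t-in-ids loop of Source B (cons = append, [] = break / loop end);
-- `fields[t]` is in range whenever taken (prev < t < len fields), so pyGetD's default is never used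
def selectLoop (fields : List String) : List Int → Int → List String
  | [], _ => []
  | t :: rest, prev =>
    if prev < t ∧ t < PySem.List.len fields
    then PySem.List.pyGetD fields t "" :: selectLoop fields rest t
    else []

-- line.split(' \t ') with a nonempty separator is PySem.Chars.splitOn on the code points
def get_blocks_alt (line : String) (ids : List Int) : List String :=
  let fields := (PySem.Chars.splitOn line.toList " \t ".toList).map String.ofList
  if ids = [] then fields else selectLoop fields ids (-1)

-- ===== PRECONDITION & SPEC =====
def Spec_get_blocks (line : String) (ids : List Int) (out : List String) : Prop := out = get_blocks_alt line ids
instance (line : String) (ids : List Int) (out : List String) : Decidable (Spec_get_blocks line ids out) := by unfold Spec_get_blocks; infer_instance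

-- ===== CLAIM (what is proved, stated in full; the proofs are below) =====
def Claim_equal_get_blocks : Prop := ∀ (line : String) (ids : List Int), Dom_get_blocks line ids → Spec_get_blocks line ids (get_blocks line ids)

-- ===== LEMMAS AND PROOFS =====

-- the separator ' \t ' as code points
def pvSep : List Char := [' ', '\t', ' ']

-- fuel-free mirror of PySem.Chars.splitOn.go for the fixed nonempty separator pvSep
def sgo : List Char → List Char → List (List Char)
  | [], cur => [cur.reverse]
  | c :: rest, cur =>
    if pvSep.isPrefixOf (c :: rest) then cur.reverse :: sgo (List.drop 2 rest) []
    else sgo rest (c :: cur)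
  termination_by l _ => l.length
  decreasing_by all_goals (simp only [List.length_drop, List.length_cons]; omega)

theorem go_eq_sgo (fuel : Nat) (l cur : List Char) (acc : List (List Char)) (hf : l.length ≤ fuel) :
    PySem.Chars.splitOn.go pvSep fuel l cur acc = acc.reverse ++ sgo l cur := by
  induction fuel generalizing l cur acc with
  | zero =>
    have hl : l = [] := by cases l with | nil => rfl | cons a b => simp at hf
    subst hl
    rw [PySem.Chars.splitOn.go.eq_1]
    simp [sgo]
  | succ fuel ih =>
    cases l with
    | nil =>
      rw [PySem.Chars.splitOn.go.eq_def]
      simp [sgo]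
    | cons c rest =>
      rw [PySem.Chars.splitOn.go.eq_def]
      simp only []
      by_cases hp : pvSep.isPrefixOf (c :: rest)
      · rw [if_pos hp, ih _ _ _ (by simp [pvSep] at hf ⊢; omega)]
        rw [sgo, if_pos hp]
        simp [pvSep]
      · rw [if_neg hp, ih _ _ _ (by simp at hf ⊢; omega)]
        rw [sgo, if_neg hp]

theorem splitOn_eq_sgo (s : List Char) :
    PySem.Chars.splitOn s pvSep = sgo s [] := by
  rw [PySem.Chars.splitOn, go_eq_sgo _ _ _ _ (by omega)]
  simp

theorem sgo_of_prefix_at (p : Nat) (l cur : List Char)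
    (hp : pvSep <+: l.drop p) (hmin : ∀ j < p, ¬ pvSep <+: l.drop j) :
    sgo l cur = (cur.reverse ++ l.take p) :: sgo (l.drop (p + 3)) [] := by
  induction p generalizing l cur with
  | zero =>
    simp only [List.drop_zero] at hp
    obtain ⟨c, rest, rfl⟩ : ∃ c rest, l = c :: rest := by
      rcases l with _ | ⟨c, rest⟩
      · exact absurd hp (by simp [pvSep])
      · exact ⟨c, rest, rfl⟩
    rw [sgo, if_pos (List.isPrefixOf_iff_prefix.mpr hp)]
    simp
  | succ p ih =>
    obtain ⟨c, rest, rfl⟩ : ∃ c rest, l = c :: rest := by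
      rcases l with _ | ⟨c, rest⟩
      · rw [List.drop_nil] at hp; exact absurd hp (by simp [pvSep])
      · exact ⟨c, rest, rfl⟩
    rw [sgo, if_neg (fun h => hmin 0 (Nat.succ_pos p) (by simpa using List.isPrefixOf_iff_prefix.mp h))]
    rw [ih rest (c :: cur) (by simpa using hp) (fun j hj => by simpa using hmin (j+1) (by omega))]
    simp

def fieldRun (ids : List Int) : List (List Char) → Int → Nat → List String
  | [], _, _ => []
  | [f], counter, i =>
    if ids = [] ∨ (i < ids.length ∧ counter + 1 = ids.getD i 0) then [String.ofList f] else []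
  | f :: g :: rest, counter, i =>
    if ids = [] ∨ counter + 1 = ids.getD i 0 then
      (if i + 1 = ids.length then [String.ofList f]
       else String.ofList f :: fieldRun ids (g :: rest) (counter + 1) (i + 1))
    else fieldRun ids (g :: rest) (counter + 1) i

theorem fieldRun_nil_ids (fs : List (List Char)) (counter : Int) (i : Nat) :
    fieldRun [] fs counter i = fs.map String.ofList := by
  induction fs generalizing counter i with
  | nil => rfl
  | cons f rest ih =>
    cases rest with
    | nil => simp [fieldRun]
    | cons g rest2 => simp [fieldRun, ih]

theorem fieldRun_eq_selectLoop (ids : List Int) (hids : ids ≠ [])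
    (full : List (List Char)) (fs : List (List Char)) (j i : Nat) (prev : Int)
    (hdrop : full.drop j = fs) (hfs : fs ≠ []) (hi : i < ids.length)
    (hprev : prev ≤ (j : Int) - 1)
    (hinv : ¬ (prev < ids.getD i 0 ∧ ids.getD i 0 ≤ (j : Int) - 1)) :
    fieldRun ids fs ((j : Int) - 1) i
      = selectLoop (full.map String.ofList) (ids.drop i) prev := by
  induction fs generalizing j i prev with
  | nil => exact absurd rfl hfs
  | cons f rest ih =>
    have hjlt : j < full.length := by
      by_contra h
      rw [List.drop_eq_nil_of_le (by omega)] at hdrop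
      simp at hdrop
    have hfj : full[j] = f := by
      have h0 := congrArg (fun l => l[0]?) hdrop
      simp only [List.getElem?_drop, Nat.add_zero] at h0
      simp only [List.getElem?_eq_getElem hjlt, List.getElem?_cons_zero, Option.some.injEq] at h0
      exact h0
    have hdrop1 : full.drop (j + 1) = rest := by
      rw [← List.tail_drop, hdrop]
      rfl
    have hgetD : ids.getD i 0 = ids[i] := List.getD_eq_getElem ids 0 hi
    have hdropids : ids.drop i = ids[i] :: ids.drop (i + 1) := List.drop_eq_getElem_cons hi
    have hlenfields : PySem.List.len (full.map String.ofList) = (full.length : Int) := by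
      simp [PySem.List.len_eq]
    set t : Int := ids[i] with ht
    cases rest with
    | nil =>
      have hlen : full.length = j + 1 := by
        have := congrArg List.length hdrop
        simp at this
        omega
      rw [fieldRun, hdropids, selectLoop, hlenfields, hgetD, hlen]
      by_cases hjt : t = (j : Int)
      · rw [if_pos (Or.inr ⟨hi, by omega⟩), if_pos ⟨by omega, by omega⟩]
        have hget : PySem.List.pyGetD (full.map String.ofList) t "" = String.ofList f := by
          rw [hjt, PySem.List.pyGetD_natCast]
          rw [List.getD_eq_getElem _ _ (by simp; omega)]
          simp [hfj]
        rw [hget]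
        rcases hrest : ids.drop (i + 1) with _ | ⟨t', r⟩
        · simp [selectLoop]
        · rw [selectLoop, hlenfields, hlen, if_neg (by rw [hjt]; push_cast; omega)]
      · rw [if_neg (by simp [hids]; intro _; omega), if_neg (by omega)]
    | cons g rest2 =>
      have hjlt1 : j + 1 < full.length := by
        by_contra h
        rw [List.drop_eq_nil_of_le (by omega)] at hdrop1
        simp at hdrop1
      rw [fieldRun, hdropids, selectLoop, hlenfields, hgetD]
      by_cases hjt : t = (j : Int)
      · rw [if_pos (show ids = [] ∨ (j : Int) - 1 + 1 = t from Or.inr (by omega)),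
          if_pos (show prev < t ∧ t < (full.length : Int) from ⟨by omega, by omega⟩)]
        have hget : PySem.List.pyGetD (full.map String.ofList) t "" = String.ofList f := by
          rw [hjt, PySem.List.pyGetD_natCast]
          rw [List.getD_eq_getElem _ _ (by simp; omega)]
          simp [hfj]
        rw [hget]
        by_cases hend : i + 1 = ids.length
        · rw [if_pos hend, List.drop_eq_nil_of_le (by omega), selectLoop]
        · rw [if_neg hend]
          have := ih (j + 1) (i + 1) t hdrop1 (by simp) (by omega)
            (by push_cast; omega) (by push_cast; omega)
          rw [show ((j : Int) - 1) + 1 = (↑(j + 1) : Int) - 1 by push_cast; omega, this, hjt]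
      · rw [if_neg (by simp [hids]; intro _; omega)]
        have := ih (j + 1) i prev hdrop1 (by simp) hi
          (by push_cast; omega) (by push_cast; omega)
        rw [show ((j : Int) - 1) + 1 = (↑(j + 1) : Int) - 1 by push_cast; omega, this,
          hdropids]
        rw [selectLoop, hlenfields]

def finishA (line : String) (ids : List Int) (st : List String × Int × Int × Nat) : List String :=
  if ids = [] ∨ (st.2.2.2 < ids.length ∧ st.2.2.1 = ids.getD st.2.2.2 0)
  then st.1 ++ [PySem.Str.slice line (some st.2.1) none]
  else st.1

theorem sgo_of_not_infix (l cur : List Char) (h : ¬ pvSep <:+: l) :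
    sgo l cur = [cur.reverse ++ l] := by
  induction l generalizing cur with
  | nil => simp [sgo]
  | cons c rest ih =>
    rw [sgo, if_neg ?_]
    · rw [ih _ fun hi => h (hi.trans (List.suffix_cons c rest).isInfix)]
      simp
    · intro hp
      exact h ((List.isPrefixOf_iff_prefix.mp hp).isInfix)

theorem sgo_ne_nil (l cur : List Char) : sgo l cur ≠ [] := by
  induction l, cur using sgo.induct with
  | case1 cur => simp [sgo]
  | case2 c rest cur h ih => intro hc; rw [sgo, if_pos h] at hc; simp at hc
  | case3 c rest cur h ih => intro hc; rw [sgo, if_neg h] at hc; exact ih hc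

theorem sep_toList : (" \t " : String).toList = pvSep := rfl

theorem slice_from_eq (line : String) (pos : Nat) :
    PySem.Str.slice line (some (pos : Int)) none = String.ofList (line.toList.drop pos) := by
  apply String.toList_inj.mp
  rw [String.toList_ofList]
  simp [PySem.Str.toList_slice, PySem.List.slice_from_natCast]

theorem slice_seg_eq (line : String) (pos : Nat) (q : Int) (hq : 0 ≤ q) :
    PySem.Str.slice line (some (pos : Int)) (some ((pos : Int) + q))
      = String.ofList ((line.toList.drop pos).take q.toNat) := by
  apply String.toList_inj.mp
  rw [String.toList_ofList]
  have h0 : (0 : Int) ≤ (pos : Int) := by omega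
  simp only [PySem.Str.toList_slice, PySem.Chars.slice_eq_listSlice]
  rw [PySem.List.slice_toNat _ h0 (by omega)]
  congr 2; omega

theorem loop_eq_fieldRun (line : String) (ids : List Int) (fuel pos : Nat)
    (counter : Int) (i : Nat) (res : List String)
    (hpos : pos ≤ line.toList.length) (hfuel : line.toList.length < fuel + pos)
    (hiLen : ids ≠ [] → i < ids.length) :
    finishA line ids (getBlocksLoop line ids fuel (pos : Int) counter i res)
    = res ++ fieldRun ids (sgo (line.toList.drop pos) []) counter i := by
  induction fuel generalizing pos counter i res with
  | zero => exact absurd hfuel (by omega)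
  | succ fuel ih =>
    rw [getBlocksLoop]
    have hfind : PySem.Str.findFrom line " \t " (pos : Int)
        = (if PySem.Chars.find (line.toList.drop pos) pvSep = -1 then -1
           else (pos : Int) + PySem.Chars.find (line.toList.drop pos) pvSep) := by
      rw [PySem.Str.findFrom_eq, sep_toList, PySem.Chars.findFrom_natCast _ _ _ hpos]
    set q := PySem.Chars.find (line.toList.drop pos) pvSep with hqdef
    have hqge : -1 ≤ q := PySem.Chars.neg_one_le_find _ _
    by_cases hq : q = -1
    · have hfind2 : PySem.Str.findFrom line " \t " (pos : Int) = -1 := by rw [hfind, if_pos hq]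
      rw [hfind2]
      simp only [reduceIte]
      rw [sgo_of_not_infix _ _ ((PySem.Chars.find_eq_neg_one_iff _ _).mp hq)]
      rw [finishA, fieldRun]
      simp only [List.reverse_nil, List.nil_append]
      by_cases hc : ids = [] ∨ (i < ids.length ∧ counter + 1 = ids.getD i 0)
      · rw [if_pos hc, if_pos hc, slice_from_eq]
      · rw [if_neg hc, if_neg hc, List.append_nil]
    · have hq0 : 0 ≤ q := by omega
      have hfind' : PySem.Str.findFrom line " \t " (pos : Int) = (pos : Int) + q := by
        rw [hfind, if_neg hq]
      rw [hfind']
      have hne : ¬ ((pos : Int) + q = -1) := by omega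
      simp only [if_neg hne]
      obtain ⟨hpre, hmin⟩ := PySem.Chars.find_spec (s := line.toList.drop pos) (sub := pvSep) (by rw [← hqdef]; omega)
      rw [← hqdef] at hpre hmin
      have h3 : pos + q.toNat + 3 ≤ line.toList.length := by
        have := hpre.length_le
        simp only [List.length_drop, pvSep, List.length_cons, List.length_nil] at this
        omega
      have hsgo : sgo (line.toList.drop pos) []
          = ((line.toList.drop pos).take q.toNat)
            :: sgo (line.toList.drop (pos + q.toNat + 3)) [] := by
        rw [sgo_of_prefix_at q.toNat _ _ hpre hmin, List.drop_drop,
          show pos + (q.toNat + 3) = pos + q.toNat + 3 from by omega]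
        simp
      rw [hsgo]
      obtain ⟨g, rest, hrest⟩ : ∃ g rest, sgo (line.toList.drop (pos + q.toNat + 3)) [] = g :: rest := by
        rcases h : sgo (line.toList.drop (pos + q.toNat + 3)) [] with _ | ⟨g, rest⟩
        · exact absurd h (sgo_ne_nil _ _)
        · exact ⟨g, rest, rfl⟩
      rw [hrest, fieldRun]
      have hpos3 : ((pos : Int) + q) + 3 = ((pos + q.toNat + 3 : Nat) : Int) := by push_cast; omega
      have hslice : PySem.Str.slice line (some (pos : Int)) (some ((pos : Int) + q))
          = String.ofList ((line.toList.drop pos).take q.toNat) := slice_seg_eq line pos q hq0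
      by_cases hc : ids = [] ∨ counter + 1 = ids.getD i 0
      · simp only [if_pos hc]
        by_cases hbreak : i + 1 = ids.length
        · have hnid : ids ≠ [] := by intro h; rw [h] at hbreak; simp at hbreak
          simp only [if_pos hbreak, finishA]
          rw [if_neg (by simp [hnid]; intro h; omega), hslice]
        · simp only [if_neg hbreak]
          rw [hpos3, ih (pos + q.toNat + 3) (counter + 1) (i + 1)
              (res ++ [PySem.Str.slice line (some (pos : Int)) (some ((pos : Int) + q))])
              h3 (by omega) (fun hnid => by have := hiLen hnid; omega)]
          rw [hrest, hslice, List.append_assoc]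
          rfl
      · simp only [if_neg hc]
        have hnid : ids ≠ [] := by intro h; exact hc (Or.inl h)
        have hilt := hiLen hnid
        rw [if_neg (by omega), hpos3,
          ih (pos + q.toNat + 3) (counter + 1) i res h3 (by omega) (fun _ => hilt)]
        rw [hrest]

theorem get_blocks_spec : Claim_equal_get_blocks := by
  intro line ids _
  show get_blocks line ids = get_blocks_alt line ids
  have hb := loop_eq_fieldRun line ids (line.toList.length + 1) 0 (-1) 0 []
    (by omega) (by omega) (fun h => List.length_pos_of_ne_nil h)
  simp only [Nat.cast_zero, List.drop_zero] at hb
  have hA : get_blocks line ids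
      = finishA line ids (getBlocksLoop line ids (line.toList.length + 1) 0 (-1) 0 []) := rfl
  rw [hA, hb, List.nil_append]
  have hfields : (PySem.Chars.splitOn line.toList " \t ".toList).map String.ofList
      = (sgo line.toList []).map String.ofList := by
    rw [sep_toList, splitOn_eq_sgo]
  by_cases hids : ids = []
  · subst hids
    rw [fieldRun_nil_ids]
    show _ = (PySem.Chars.splitOn line.toList " \t ".toList).map String.ofList
    rw [hfields]
  · have halt : get_blocks_alt line ids
        = selectLoop ((PySem.Chars.splitOn line.toList " \t ".toList).map String.ofList) ids (-1) := by
      unfold get_blocks_alt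
      rw [if_neg hids]
    rw [halt, hfields]
    have := fieldRun_eq_selectLoop ids hids (sgo line.toList []) (sgo line.toList []) 0 0 (-1)
      List.drop_zero (sgo_ne_nil _ _) (List.length_pos_of_ne_nil hids)
      (by omega) (by omega)
    simpa using this
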